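-- pv_equiv track=rewrite | github.com/gh0stintheshe11/LeetCode-Solutions | solutions/destroy-sequential-targets/Python3.py | destroyTargets
-- ===== SOURCE A (Python) =====
-- from collections import defaultdict
-- from typing import List
--
-- def destroyTargets(nums: List[int], space: int) -> int:
--     remainder_count = defaultdict(int)
--     num_to_rem = {}
--
--     for num in nums:
--         remainder = num % space
--         remainder_count[remainder] += 1
--         if remainder not in num_to_rem or num_to_rem[remainder] > num:
--             num_to_rem[remainder] = num
--
--     max_destroy = max(remainder_count.values())
--     min_seed = float('inf')
--
--     for remainder in remainder_count:
--         if remainder_count[remainder] == max_destroy: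
--             min_seed = min(min_seed, num_to_rem[remainder])
--
--     return min_seed
-- ===== SOURCE B (Python) =====
-- def destroyTargets(nums, space):
--     remainder_count = {}
--     for num in nums:
--         r = num % space
--         remainder_count[r] = remainder_count.get(r, 0) + 1
--     max_destroy = max(remainder_count.values())
--     return min(num for num in nums if remainder_count[num % space] == max_destroy)
-- ===== Notes on version B (the rewrite author's own statement) =====
-- stated objective: simpler
-- what changed: B drops the num_to_rem per-remainder-minimum dict entirely: one pass builds only the remainder counter, then the answer is the min over the original nums list of the seeds whose remainder group has maximal count, instead of tracking per-remainder minima and scanning dict keys.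
import Mathlib
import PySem

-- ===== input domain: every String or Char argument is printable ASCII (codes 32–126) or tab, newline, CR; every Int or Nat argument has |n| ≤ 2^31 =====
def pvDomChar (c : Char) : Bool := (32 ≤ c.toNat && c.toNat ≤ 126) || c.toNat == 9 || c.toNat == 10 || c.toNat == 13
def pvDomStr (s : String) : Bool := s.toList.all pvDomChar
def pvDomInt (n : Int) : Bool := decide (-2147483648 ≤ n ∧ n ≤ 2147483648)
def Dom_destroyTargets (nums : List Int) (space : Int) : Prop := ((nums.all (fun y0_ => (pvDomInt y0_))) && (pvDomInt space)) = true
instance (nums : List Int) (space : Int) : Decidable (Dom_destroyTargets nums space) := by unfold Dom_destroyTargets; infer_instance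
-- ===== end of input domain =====

-- B drops the per-remainder-minimum dict: it keeps only the remainder counter and takes the
-- min over nums of the seeds whose remainder group is maximal (objective: simpler).

-- ===== PORT A =====
-- Python's float('inf') sentinel is modeled as `none`; `.getD 0` at the end and the
-- `getD remainder 0` lookups are unreachable defaults (keys are always present; with
-- Pre_ the accumulator is some _ at the end).
def destroyTargets (nums : List Int) (space : Int) : Int :=
  let p := nums.foldl
    (fun (st : PySem.Dict Int Int × PySem.Dict Int Int) num =>
      let remainder := PySem.Int.mod num space
      (st.1.modify remainder 0 (· + 1),
       if st.2.contains remainder = false ∨ st.2.getD remainder 0 > num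
       then st.2.insert remainder num else st.2))
    (PySem.Dict.empty, PySem.Dict.empty)
  let maxDestroy := (PySem.List.max? p.1.values (fun v => v)).getD 0
  let minSeed := p.1.keys.foldl
    (fun (acc : Option Int) remainder =>
      if p.1.getD remainder 0 = maxDestroy
      then some (match acc with
                 | none => p.2.getD remainder 0
                 | some m => min m (p.2.getD remainder 0))
      else acc)
    none
  minSeed.getD 0

-- ===== PORT B =====
def destroyTargets_alt (nums : List Int) (space : Int) : Int :=
  let rc := nums.foldl
    (fun (d : PySem.Dict Int Int) num =>
      let r := PySem.Int.mod num space
      d.insert r (d.getD r 0 + 1))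
    PySem.Dict.empty
  let maxDestroy := (PySem.List.max? rc.values (fun v => v)).getD 0
  (PySem.List.min?
    (nums.filter (fun num => rc.getD (PySem.Int.mod num space) 0 == maxDestroy))
    (fun x => x)).getD 0

-- ===== PRECONDITION & SPEC =====
-- Pre_ excludes exactly the inputs on which Python A raises: empty nums (max() of an
-- empty dict-values view, ValueError) and space = 0 (ZeroDivisionError from %).
def Pre_destroyTargets (nums : List Int) (space : Int) : Prop :=
  nums ≠ [] ∧ space ≠ 0
instance (nums : List Int) (space : Int) : Decidable (Pre_destroyTargets nums space) := by
  unfold Pre_destroyTargets; infer_instance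

def pvWitness_destroyTargets : List Int × Int := ([3, 7, 8, 1, 1, 5], 2)

def Spec_destroyTargets (nums : List Int) (space : Int) (out : Int) : Prop :=
  out = destroyTargets_alt nums space
instance (nums : List Int) (space : Int) (out : Int) : Decidable (Spec_destroyTargets nums space out) := by
  unfold Spec_destroyTargets; infer_instance

-- ===== CLAIM (what is proved, stated in full; the proofs are below) =====
def Claim_equal_destroyTargets : Prop :=
  ∀ (nums : List Int) (space : Int), Dom_destroyTargets nums space →
    Pre_destroyTargets nums space →
    Spec_destroyTargets nums space (destroyTargets nums space)

-- ===== LEMMAS AND PROOFS =====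

-- the body of A's second loop: running minimum with `none` playing float('inf')
def pvOmin (acc : Option Int) (v : Int) : Option Int :=
  some (match acc with | none => v | some m => min m v)

theorem pvOmin_foldl_some (t : List Int) (x : Int) :
    t.foldl pvOmin (some x) = some (t.foldl min x) := by
  induction t generalizing x with
  | nil => rfl
  | cons y t ih => simp [pvOmin, ih]

theorem mval_eq_min? (l : List Int) :
    l.foldl pvOmin none = PySem.List.min? l (fun y => y) := by
  cases l with
  | nil => rfl
  | cons x t =>
    rw [PySem.List.min?_id_cons]
    show t.foldl pvOmin (some x) = _
    rw [pvOmin_foldl_some]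

-- A's num_to_rem after the first loop: its entry at r is the minimum of the
-- nums whose remainder is r (none if there is no such num)
theorem ntr_get? (space : Int) (nums : List Int) (r : Int) :
    (nums.foldl
      (fun (d : PySem.Dict Int Int) num =>
        if d.contains (PySem.Int.mod num space) = false ∨
           d.getD (PySem.Int.mod num space) 0 > num
        then d.insert (PySem.Int.mod num space) num else d)
      PySem.Dict.empty).get? r
    = (nums.filter (fun n => PySem.Int.mod n space == r)).foldl pvOmin none := by
  induction nums using List.reverseRecOn with
  | nil => simp [PySem.Dict.get?_empty]
  | append_singleton ys n ih =>
    rw [List.foldl_append, List.filter_append, List.foldl_append]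
    set d := ys.foldl
      (fun (d : PySem.Dict Int Int) num =>
        if d.contains (PySem.Int.mod num space) = false ∨
           d.getD (PySem.Int.mod num space) 0 > num
        then d.insert (PySem.Int.mod num space) num else d)
      PySem.Dict.empty with hd
    by_cases hr : PySem.Int.mod n space = r
    · subst hr
      simp only [List.foldl_cons, List.foldl_nil, List.filter_cons, beq_self_eq_true,
        if_pos, List.filter_nil]
      rw [← ih]
      rcases hget : d.get? (PySem.Int.mod n space) with _ | m
      · have hc : d.contains (PySem.Int.mod n space) = false := by
          rw [PySem.Dict.contains_eq_isSome_get?, hget]; rfl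
        rw [if_pos (Or.inl hc), PySem.Dict.get?_insert_self]
        rfl
      · have hc : d.contains (PySem.Int.mod n space) = true := by
          rw [PySem.Dict.contains_eq_isSome_get?, hget]; rfl
        have hgd : d.getD (PySem.Int.mod n space) 0 = m := by
          rw [PySem.Dict.getD_eq_get?_getD, hget]; rfl
        by_cases hlt : m > n
        · rw [if_pos (Or.inr (by rw [hgd]; exact hlt)), PySem.Dict.get?_insert_self]
          simp [pvOmin, min_eq_right (le_of_lt hlt)]
        · have : ¬ (d.contains (PySem.Int.mod n space) = false ∨
              d.getD (PySem.Int.mod n space) 0 > n) := by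
            rw [hgd, hc]; simp; omega
          rw [if_neg this, hget]
          simp [pvOmin, min_eq_left (by omega : m ≤ n)]
    · have hfilt : (List.filter (fun n_1 => PySem.Int.mod n_1 space == r) [n]) = [] := by
        simp [hr]
      rw [hfilt, List.foldl_nil, ← ih, List.foldl_cons, List.foldl_nil]
      split_ifs with h
      · apply PySem.Dict.get?_insert_of_ne
        exact Ne.symm hr
      · rfl

theorem destroyTargets_spec : Claim_equal_destroyTargets := by
  intro nums space _ hpre
  obtain ⟨hne, -⟩ := hpre
  unfold Spec_destroyTargets destroyTargets destroyTargets_alt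
  simp only []
  -- name the pieces
  set key : Int → Int := fun n => PySem.Int.mod n space with hkey
  -- split A's paired loop into its two independent loops
  rw [PySem.List.foldl_prod_mk
    (f := fun (d : PySem.Dict Int Int) num => d.modify (PySem.Int.mod num space) 0 (· + 1))
    (g := fun (d : PySem.Dict Int Int) num =>
      if d.contains (PySem.Int.mod num space) = false ∨
         d.getD (PySem.Int.mod num space) 0 > num
      then d.insert (PySem.Int.mod num space) num else d)]
  -- both count loops are Counter(nums map key)
  have hrcA : nums.foldl
      (fun (d : PySem.Dict Int Int) num => d.modify (PySem.Int.mod num space) 0 (· + 1))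
      PySem.Dict.empty = PySem.Dict.counter (nums.map key) := by
    rw [PySem.Dict.counter_eq_foldl, List.foldl_map]
  have hrcB : nums.foldl
      (fun (d : PySem.Dict Int Int) num =>
        d.insert (PySem.Int.mod num space) ((d.getD (PySem.Int.mod num space) 0) + 1))
      PySem.Dict.empty = PySem.Dict.counter (nums.map key) := by
    rw [← PySem.Dict.foldl_insert_getD_add_one_eq_counter, List.foldl_map]
  rw [hrcA, hrcB]
  set C := PySem.Dict.counter (nums.map key) with hC
  set maxD := (PySem.List.max? C.values (fun v => v)).getD 0 with hmaxD
  set ntr := nums.foldl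
      (fun (d : PySem.Dict Int Int) num =>
        if d.contains (PySem.Int.mod num space) = false ∨
           d.getD (PySem.Int.mod num space) 0 > num
        then d.insert (PySem.Int.mod num space) num else d)
      PySem.Dict.empty with hntr
  -- A's second loop is a running min over the selected remainders
  have hloop : C.keys.foldl
      (fun (acc : Option Int) remainder =>
        if C.getD remainder 0 = maxD
        then some (match acc with
                   | none => ntr.getD remainder 0
                   | some m => min m (ntr.getD remainder 0))
        else acc) none
      = ((C.keys.filter (fun r => decide (C.getD r 0 = maxD))).map
          (fun r => ntr.getD r 0)).foldl pvOmin none := by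
    rw [List.foldl_map]
    rw [← PySem.List.foldl_ite_eq_foldl_filter (p := fun r => C.getD r 0 = maxD)
        (f := fun (acc : Option Int) r => pvOmin acc (ntr.getD r 0))]
    rfl
  rw [hloop]
  set sel := C.keys.filter (fun r => decide (C.getD r 0 = maxD)) with hsel
  -- basic facts about C
  have hkeys : C.keys = PySem.Set.ofList (nums.map key) := PySem.Dict.keys_counter _
  have hmemkeys : ∀ r, r ∈ C.keys ↔ ∃ n ∈ nums, key n = r := by
    intro r
    rw [hkeys, PySem.Set.mem_ofList, List.mem_map]
  have hcount : ∀ r, C.getD r 0 = ((nums.map key).count r : Int) :=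
    fun r => PySem.Dict.getD_counter _ _
  -- maxD is attained at some key r0
  obtain ⟨x, nums', hx⟩ : ∃ x l, nums = x :: l := by
    cases nums with
    | nil => exact absurd rfl hne
    | cons x l => exact ⟨x, l, rfl⟩
  have hkx : key x ∈ C.keys := (hmemkeys (key x)).2 ⟨x, by simp [hx], rfl⟩
  have hkeysne : C.keys ≠ [] := fun h => by rw [h] at hkx; exact List.not_mem_nil hkx
  have hvals : C.values = C.keys.map (fun k => C.getD k 0) :=
    PySem.Dict.values_eq_map_keys C (PySem.Dict.nodup_keys_counter _) 0
  have hvalsne : C.values ≠ [] := by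
    rw [hvals]; simpa using hkeysne
  obtain ⟨m, hm⟩ : ∃ m, PySem.List.max? C.values (fun v => v) = some m := by
    rcases h : PySem.List.max? C.values (fun v => v) with _ | m
    · exact absurd ((PySem.List.max?_eq_none_iff _ _).1 h) hvalsne
    · exact ⟨m, rfl⟩
  have hmaxD' : maxD = m := by rw [hmaxD, hm]; rfl
  have hmmem : m ∈ C.values := PySem.List.max?_mem hm
  obtain ⟨r0, hr0k, hr0v⟩ : ∃ r0 ∈ C.keys, C.getD r0 0 = maxD := by
    rw [hvals] at hmmem
    obtain ⟨r0, hr0, hv⟩ := List.mem_map.1 hmmem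
    exact ⟨r0, hr0, by rw [hv, hmaxD']⟩
  have hr0sel : r0 ∈ sel := by
    rw [hsel, List.mem_filter]
    exact ⟨hr0k, by simpa using hr0v⟩
  -- the remainder class of a key is nonempty; ntr holds its minimum
  have hclass : ∀ r, ntr.get? r = (nums.filter (fun n => key n == r)).foldl pvOmin none :=
    fun r => ntr_get? space nums r
  -- the filtered-nums list B minimises over
  set F := nums.filter (fun num => C.getD (key num) 0 == maxD) with hF
  have hmemF : ∀ b, b ∈ F ↔ b ∈ nums ∧ C.getD (key b) 0 = maxD := by
    intro b; rw [hF, List.mem_filter]; simp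
  -- each selected remainder's stored value is a member of F and a lower bound of its class
  have hmv : ∀ r ∈ sel, ∃ v, ntr.getD r 0 = v ∧ v ∈ F ∧ ∀ b ∈ nums, key b = r → v ≤ b := by
    intro r hr
    rw [hsel, List.mem_filter] at hr
    obtain ⟨hrk, hrv⟩ := hr
    have hrv' : C.getD r 0 = maxD := by simpa using hrv
    obtain ⟨n0, hn0, hkn0⟩ := (hmemkeys r).1 hrk
    have hclne : nums.filter (fun n => key n == r) ≠ [] := by
      intro h
      have : n0 ∈ nums.filter (fun n => key n == r) := by
        rw [List.mem_filter]; exact ⟨hn0, by simp [hkn0]⟩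
      rw [h] at this; exact List.not_mem_nil this
    obtain ⟨v, hv⟩ : ∃ v, PySem.List.min? (nums.filter (fun n => key n == r)) (fun y => y) = some v := by
      rcases h : PySem.List.min? (nums.filter (fun n => key n == r)) (fun y => y) with _ | v
      · exact absurd ((PySem.List.min?_eq_none_iff _ _).1 h) hclne
      · exact ⟨v, rfl⟩
    have hget : ntr.get? r = some v := by rw [hclass r, mval_eq_min?, hv]
    refine ⟨v, by rw [PySem.Dict.getD_eq_get?_getD, hget]; rfl, ?_, ?_⟩
    · have hvmem := PySem.List.min?_mem hv
      rw [List.mem_filter] at hvmem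
      obtain ⟨hvnums, hvkey⟩ := hvmem
      have hvkey' : key v = r := by simpa using hvkey
      rw [hmemF]
      exact ⟨hvnums, by rw [hvkey', hrv']⟩
    · intro b hb hkb
      have : b ∈ nums.filter (fun n => key n == r) := by
        rw [List.mem_filter]; exact ⟨hb, by simp [hkb]⟩
      exact PySem.List.min?_isMin hv b this
  -- A's accumulator value
  have hselmapne : sel.map (fun r => ntr.getD r 0) ≠ [] := by
    intro h
    have : ntr.getD r0 0 ∈ sel.map (fun r => ntr.getD r 0) := List.mem_map_of_mem hr0sel
    rw [h] at this; exact List.not_mem_nil this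
  obtain ⟨a, ha⟩ : ∃ a, PySem.List.min? (sel.map (fun r => ntr.getD r 0)) (fun y => y) = some a := by
    rcases h : PySem.List.min? (sel.map (fun r => ntr.getD r 0)) (fun y => y) with _ | a
    · exact absurd ((PySem.List.min?_eq_none_iff _ _).1 h) hselmapne
    · exact ⟨a, rfl⟩
  -- a is in F and a lower bound of F
  have haF : a ∈ F := by
    have := PySem.List.min?_mem ha
    obtain ⟨r, hrsel, hra⟩ := List.mem_map.1 this
    obtain ⟨v, hveq, hvF, -⟩ := hmv r hrsel
    rw [← hra, hveq]; exact hvF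
  have halb : ∀ b ∈ F, a ≤ b := by
    intro b hb
    rw [hmemF] at hb
    obtain ⟨hbnums, hbmax⟩ := hb
    have hkbsel : key b ∈ sel := by
      rw [hsel, List.mem_filter]
      exact ⟨(hmemkeys (key b)).2 ⟨b, hbnums, rfl⟩, by simpa using hbmax⟩
    obtain ⟨v, hveq, -, hvlb⟩ := hmv (key b) hkbsel
    have h1 : a ≤ ntr.getD (key b) 0 :=
      PySem.List.min?_isMin ha _ (List.mem_map_of_mem hkbsel)
    have h2 : v ≤ b := hvlb b hbnums rfl
    rw [hveq] at h1; exact le_trans h1 h2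
  -- B's value
  have hFne : F ≠ [] := by
    intro h; rw [h] at haF; exact List.not_mem_nil haF
  obtain ⟨b0, hb0⟩ : ∃ b0, PySem.List.min? F (fun y => y) = some b0 := by
    rcases h : PySem.List.min? F (fun y => y) with _ | b0
    · exact absurd ((PySem.List.min?_eq_none_iff _ _).1 h) hFne
    · exact ⟨b0, rfl⟩
  have hab : a = b0 :=
    le_antisymm (halb b0 (PySem.List.min?_mem hb0)) (PySem.List.min?_isMin hb0 a haF)
  rw [mval_eq_min?, ha, hb0, hab]
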